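-- pv_equiv track=rewrite | github.com/alokranjan609/lab | labs/mono.py | decrypt_with_mapping
-- ===== SOURCE A (Python) =====
-- def decrypt_with_mapping(ciphertext, mapping):
--     result = ""
--
--     for ch in ciphertext:
--         if ch.isalpha():
--             is_upper = ch.isupper()
--             c = ch.upper()
--             if c in mapping:
--                 p = mapping[c]
--             else:
--                 p = c  # if no mapping, leave as is
--
--             # Restore case
--             if not is_upper:
--                 p = p.lower()
--
--             result += p
--         else:
--             # Non-letters are unchanged (spaces, punctuation, digits)
--             result += ch
--
--     return result
-- ===== SOURCE B (Python) =====
-- def decrypt_with_mapping(ciphertext, mapping):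
--     # Precompute a translation table: each single-char uppercase-letter key maps
--     # itself to its value and its lowercase form to the lowercased value; then
--     # one C-level translate pass does the whole decryption.
--     table = {}
--     for k, v in mapping.items():
--         if len(k) == 1 and 'A' <= k <= 'Z':
--             table[ord(k)] = v
--             table[ord(k) + 32] = v.lower()
--     return ciphertext.translate(table)
-- ===== Notes on version B (the rewrite author's own statement) =====
-- stated objective: faster
-- what changed: B precomputes a translation table (one entry for each single-char uppercase key and its lowercase twin) and decrypts with a single str.translate pass, replacing A's per-character isalpha/isupper branching, dict lookups and string concatenation.
import Mathlib
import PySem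

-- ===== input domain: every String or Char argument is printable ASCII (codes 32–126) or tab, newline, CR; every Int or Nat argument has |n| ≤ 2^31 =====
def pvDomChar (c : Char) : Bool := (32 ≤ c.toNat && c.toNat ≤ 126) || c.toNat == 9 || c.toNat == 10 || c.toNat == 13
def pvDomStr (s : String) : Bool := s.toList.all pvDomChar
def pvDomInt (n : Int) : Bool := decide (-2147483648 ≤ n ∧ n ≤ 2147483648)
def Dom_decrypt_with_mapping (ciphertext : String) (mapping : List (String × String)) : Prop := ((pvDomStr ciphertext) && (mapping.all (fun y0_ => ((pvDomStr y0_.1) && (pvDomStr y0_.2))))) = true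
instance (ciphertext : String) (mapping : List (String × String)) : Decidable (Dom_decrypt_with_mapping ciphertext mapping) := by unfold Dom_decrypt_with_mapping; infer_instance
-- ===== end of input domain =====

-- B replaces A's per-character isalpha/isupper branching with a precomputed
-- translation table and one str.translate pass (measured faster in a timing run).

-- ===== PORT A =====
-- A builds the result string character by character (ported on the char list).
def decrypt_with_mapping (ciphertext : String) (mapping : List (String × String)) : String :=
  String.ofList (ciphertext.toList.foldl (fun result ch =>
    if PySem.Chars.isalpha ch then
      let is_upper := PySem.Chars.isupper ch
      let c := PySem.Chars.upperChar ch
      let md := PySem.Dict.ofList mapping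
      let p := if md.contains (String.ofList [c]) then md.getD (String.ofList [c]) "" else String.ofList [c]
      let p := if !is_upper then PySem.Str.lower p else p
      result ++ p.toList
    else
      result ++ [ch]) [])

-- ===== PORT B =====
-- Source B's table-building loop: each single-char uppercase key contributes two
-- table entries (exact hand port; dict iteration = items of the dict).
def pvTableStep (table : PySem.Dict Char String) (kv : String × String) : PySem.Dict Char String :=
  match kv.1.toList with
  | [c] => if PySem.Chars.isupper c then
             (table.insert c kv.2).insert (Char.ofNat (c.toNat + 32)) (PySem.Str.lower kv.2)
           else table
  | _ => table

def pvTable (mapping : List (String × String)) : PySem.Dict Char String :=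
  (PySem.Dict.ofList mapping).items.foldl pvTableStep PySem.Dict.empty

-- str.translate with str values: each char is replaced by its table entry,
-- chars absent from the table pass through (exact hand port of translate here).
def decrypt_with_mapping_alt (ciphertext : String) (mapping : List (String × String)) : String :=
  String.ofList (ciphertext.toList.flatMap (fun ch =>
    (((pvTable mapping).get? ch).getD (String.ofList [ch])).toList))

-- ===== PRECONDITION & SPEC =====
def Spec_decrypt_with_mapping (ciphertext : String) (mapping : List (String × String)) (out : String) : Prop := out = decrypt_with_mapping_alt ciphertext mapping
instance (ciphertext : String) (mapping : List (String × String)) (out : String) : Decidable (Spec_decrypt_with_mapping ciphertext mapping out) := by unfold Spec_decrypt_with_mapping; infer_instance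

-- ===== CLAIM (what is proved, stated in full; the proofs are below) =====
def Claim_equal_decrypt_with_mapping : Prop := ∀ (ciphertext : String) (mapping : List (String × String)), Dom_decrypt_with_mapping ciphertext mapping → Spec_decrypt_with_mapping ciphertext mapping (decrypt_with_mapping ciphertext mapping)

-- ===== LEMMAS AND PROOFS =====

-- ===== VERDICT (by name: the statement is the Claim_ definition above) =====
lemma ofNat_toNat_lt (n : Nat) (h : n < 55296) : (Char.ofNat n).toNat = n := by
  unfold Char.ofNat
  split
  · simp [Char.toNat, Char.ofNatAux]
  · rename_i hv; exact absurd (Or.inl h) hv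

lemma isupper_bounds {c : Char} (h : PySem.Chars.isupper c = true) :
    65 ≤ c.toNat ∧ c.toNat ≤ 90 := by
  simp [PySem.Chars.isupper, Char.le_def, UInt32.le_iff_toNat_le] at h
  exact h

lemma islower_bounds {c : Char} (h : PySem.Chars.islower c = true) :
    97 ≤ c.toNat ∧ c.toNat ≤ 122 := by
  simp [PySem.Chars.islower, Char.le_def, UInt32.le_iff_toNat_le] at h
  exact h

lemma up_toNat {c : Char} (h : PySem.Chars.isupper c = true) :
    (Char.ofNat (c.toNat + 32)).toNat = c.toNat + 32 := by
  have := isupper_bounds h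
  exact ofNat_toNat_lt _ (by omega)

lemma isupper_iff {c : Char} : PySem.Chars.isupper c = true ↔ 65 ≤ c.toNat ∧ c.toNat ≤ 90 := by
  simp [PySem.Chars.isupper, Char.le_def, UInt32.le_iff_toNat_le]

lemma islower_iff {c : Char} : PySem.Chars.islower c = true ↔ 97 ≤ c.toNat ∧ c.toNat ≤ 122 := by
  simp [PySem.Chars.islower, Char.le_def, UInt32.le_iff_toNat_le]

lemma up_ne_low {c : Char} (h : PySem.Chars.isupper c = true) :
    Char.ofNat (c.toNat + 32) ≠ c := by
  intro he
  have := congrArg Char.toNat he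
  rw [up_toNat h] at this
  omega

lemma islower_low {c : Char} (h : PySem.Chars.isupper c = true) :
    PySem.Chars.islower (Char.ofNat (c.toNat + 32)) = true := by
  rw [islower_iff, up_toNat h]
  have := isupper_bounds h
  omega

lemma char_eq_of_toNat {a b : Char} (h : a.toNat = b.toNat) : a = b := by
  apply Char.ext
  exact UInt32.toNat_inj.mp h

lemma upperChar_low {c : Char} (h : PySem.Chars.isupper c = true) :
    PySem.Chars.upperChar (Char.ofNat (c.toNat + 32)) = c := by
  rw [PySem.Chars.upperChar, if_pos (islower_low h)]
  apply char_eq_of_toNat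
  rw [up_toNat h]
  have hb := isupper_bounds h
  have : c.toNat + 32 - 32 = c.toNat := by omega
  rw [this]
  exact ofNat_toNat_lt _ (by omega)

lemma isupper_upperChar {x : Char} (h : PySem.Chars.islower x = true) :
    PySem.Chars.isupper (PySem.Chars.upperChar x) = true := by
  rw [PySem.Chars.upperChar, if_pos h, isupper_iff, ofNat_toNat_lt _ (by have := islower_bounds h; omega)]
  have := islower_bounds h
  omega

lemma low_upperChar {x : Char} (h : PySem.Chars.islower x = true) :
    Char.ofNat ((PySem.Chars.upperChar x).toNat + 32) = x := by
  rw [PySem.Chars.upperChar, if_pos h]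
  have hb := islower_bounds h
  rw [ofNat_toNat_lt _ (by omega)]
  apply char_eq_of_toNat
  have : x.toNat - 32 + 32 = x.toNat := by omega
  rw [this]
  exact ofNat_toNat_lt _ (by omega)

lemma not_islower_of_isupper {c : Char} (h : PySem.Chars.isupper c = true) :
    PySem.Chars.islower c = false := by
  rw [Bool.eq_false_iff]
  intro hl
  have := isupper_bounds h
  have := islower_bounds hl
  omega


lemma upperChar_of_isupper {c : Char} (h : PySem.Chars.isupper c = true) :
    PySem.Chars.upperChar c = c := by
  rw [PySem.Chars.upperChar, if_neg (by simp [not_islower_of_isupper h])]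


lemma key_eq_iff (k : String) (x : Char) : (k == String.ofList [x]) = true ↔ k.toList = [x] := by
  rw [beq_iff_eq]
  constructor
  · intro h; rw [h]; simp
  · intro h
    have := congrArg String.ofList h
    simpa using this

lemma table_aux (l : List (String × String)) (t : PySem.Dict Char String) (x : Char)
    (h : (l.map Prod.fst).Nodup) :
    (l.foldl pvTableStep t).get? x =
      if PySem.Chars.isupper x then
        ((l.find? (fun p => p.1 == String.ofList [x])).map Prod.snd).or (t.get? x)
      else if PySem.Chars.islower x then
        (((l.find? (fun p => p.1 == String.ofList [PySem.Chars.upperChar x])).map Prod.snd).map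
          (fun v => PySem.Str.lower v)).or (t.get? x)
      else t.get? x := by
  induction l generalizing t with
  | nil => simp
  | cons kv l ih =>
    obtain ⟨hk, hnd⟩ := List.nodup_cons.mp h
    rw [List.foldl_cons, ih _ hnd]
    -- no later key equals kv.1
    have hfind : ∀ (s : String), s = kv.1 → l.find? (fun p => p.1 == s) = none := by
      intro s hs
      apply List.find?_eq_none.mpr
      intro p hp hps
      apply hk
      have : p.1 = kv.1 := by rw [beq_iff_eq.mp hps, hs]
      exact List.mem_map.mpr ⟨p, hp, this⟩
    rcases hc : kv.1.toList with _ | ⟨c, cs⟩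
    case _ =>
      -- empty key: step is identity, head never matches any single-char key
      have hstep : pvTableStep t kv = t := by unfold pvTableStep; rw [hc]
      rw [hstep]
      have hhead : ∀ y : Char, (kv.1 == String.ofList [y]) = false := by
        intro y
        rw [Bool.eq_false_iff]
        intro hb
        rw [key_eq_iff] at hb
        rw [hc] at hb; simp at hb
      split_ifs <;> simp [List.find?_cons, hhead]
    case _ =>
      rcases cs with _ | ⟨c2, cs2⟩
      case nil =>
        have hkv1 : kv.1 = String.ofList [c] := by
          have := congrArg String.ofList hc; simpa using this
        by_cases hcu : PySem.Chars.isupper c = true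
        · have hstep : pvTableStep t kv
              = (t.insert c kv.2).insert (Char.ofNat (c.toNat + 32)) (PySem.Str.lower kv.2) := by
            simp only [pvTableStep, hc]; rw [if_pos hcu]
          by_cases hxu : PySem.Chars.isupper x = true
          · by_cases hxc : x = c
            · subst hxc
              have hhead : (kv.1 == String.ofList [x]) = true := by rw [key_eq_iff, hc]
              have hnone := hfind (String.ofList [x]) hkv1.symm
              have hget : (pvTableStep t kv).get? x = some kv.2 := by
                rw [hstep, PySem.Dict.get?_insert, if_neg (Ne.symm (up_ne_low hcu)),
                    PySem.Dict.get?_insert, if_pos rfl]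
              simp [hxu, List.find?_cons, hhead, hnone, hget]
            · have hhead : (kv.1 == String.ofList [x]) = false := by
                rw [Bool.eq_false_iff]; intro hb
                rw [key_eq_iff, hc] at hb
                simp at hb; exact hxc hb.symm
              have hget : (pvTableStep t kv).get? x = t.get? x := by
                rw [hstep, PySem.Dict.get?_insert, if_neg, PySem.Dict.get?_insert, if_neg hxc]
                intro he
                have : PySem.Chars.islower x = true := he ▸ islower_low hcu
                rw [not_islower_of_isupper hxu] at this; exact Bool.noConfusion this
              simp [hxu, List.find?_cons, hhead, hget]
          · by_cases hxl : PySem.Chars.islower x = true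
            · by_cases huc : PySem.Chars.upperChar x = c
              · have hxeq : x = Char.ofNat (c.toNat + 32) := by
                  rw [← huc, low_upperChar hxl]
                have hhead : (kv.1 == String.ofList [PySem.Chars.upperChar x]) = true := by
                  rw [key_eq_iff, hc, huc]
                have hnone := hfind (String.ofList [PySem.Chars.upperChar x])
                  (by rw [hkv1, huc])
                have hget : (pvTableStep t kv).get? x = some (PySem.Str.lower kv.2) := by
                  rw [hstep, hxeq, PySem.Dict.get?_insert, if_pos rfl]
                simp [hxu, hxl, List.find?_cons, hhead, hnone, hget]
              · have hhead : (kv.1 == String.ofList [PySem.Chars.upperChar x]) = false := by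
                  rw [Bool.eq_false_iff]; intro hb
                  rw [key_eq_iff, hc] at hb
                  simp at hb; exact huc hb.symm
                have hget : (pvTableStep t kv).get? x = t.get? x := by
                  rw [hstep, PySem.Dict.get?_insert, if_neg, PySem.Dict.get?_insert, if_neg]
                  · intro he
                    rw [he, not_islower_of_isupper hcu] at hxl; exact Bool.noConfusion hxl
                  · intro he
                    exact huc (by rw [he, upperChar_low hcu])
                simp [hxu, hxl, List.find?_cons, hhead, hget]
            · have hget : (pvTableStep t kv).get? x = t.get? x := by
                rw [hstep, PySem.Dict.get?_insert, if_neg, PySem.Dict.get?_insert, if_neg]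
                · intro he; rw [he, hcu] at hxu; exact hxu rfl
                · intro he; rw [he, islower_low hcu] at hxl; exact hxl rfl
              simp [hxu, hxl, hget]
        · have hstep : pvTableStep t kv = t := by
            simp only [pvTableStep, hc]; rw [if_neg hcu]
          rw [hstep]
          by_cases hxu : PySem.Chars.isupper x = true
          · have hhead : (kv.1 == String.ofList [x]) = false := by
              rw [Bool.eq_false_iff]; intro hb
              rw [key_eq_iff, hc] at hb
              simp at hb
              apply hcu; rw [hb]; exact hxu
            simp [hxu, List.find?_cons, hhead]
          · by_cases hxl : PySem.Chars.islower x = true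
            · have hhead : (kv.1 == String.ofList [PySem.Chars.upperChar x]) = false := by
                rw [Bool.eq_false_iff]; intro hb
                rw [key_eq_iff, hc] at hb
                simp at hb
                apply hcu; rw [hb]; exact isupper_upperChar hxl
              simp [hxu, hxl, List.find?_cons, hhead]
            · simp [hxu, hxl]
      case cons =>
        have hstep : pvTableStep t kv = t := by unfold pvTableStep; rw [hc]
        rw [hstep]
        have hhead : ∀ y : Char, (kv.1 == String.ofList [y]) = false := by
          intro y
          rw [Bool.eq_false_iff]
          intro hb
          rw [key_eq_iff] at hb
          rw [hc] at hb; simp at hb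
        split_ifs <;> simp [List.find?_cons, hhead]

lemma lowerChar_upperChar {x : Char} (h : PySem.Chars.islower x = true) :
    PySem.Chars.lowerChar (PySem.Chars.upperChar x) = x := by
  rw [PySem.Chars.lowerChar, if_pos (isupper_upperChar h)]
  exact low_upperChar h

lemma table_get (mapping : List (String × String)) (x : Char) :
    (pvTable mapping).get? x =
      if PySem.Chars.isupper x then (PySem.Dict.ofList mapping).get? (String.ofList [x])
      else if PySem.Chars.islower x then
        ((PySem.Dict.ofList mapping).get? (String.ofList [PySem.Chars.upperChar x])).map
          (fun v => PySem.Str.lower v)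
      else none := by
  have hnd : ((PySem.Dict.ofList mapping).items.map Prod.fst).Nodup := by
    have := PySem.Dict.nodup_keys_ofList (ps := mapping)
    simpa [PySem.Dict.keys] using this
  rw [pvTable, table_aux _ _ _ hnd]
  simp [PySem.Dict.get?, PySem.Dict.empty, Option.map_map, Function.comp]

lemma body_eq (mapping : List (String × String)) (acc : List Char) (ch : Char) :
    (if PySem.Chars.isalpha ch then
      let is_upper := PySem.Chars.isupper ch
      let c := PySem.Chars.upperChar ch
      let md := PySem.Dict.ofList mapping
      let p := if md.contains (String.ofList [c]) then md.getD (String.ofList [c]) "" else String.ofList [c]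
      let p := if !is_upper then PySem.Str.lower p else p
      acc ++ p.toList
    else
      acc ++ [ch]) =
    acc ++ (((pvTable mapping).get? ch).getD (String.ofList [ch])).toList := by
  rw [table_get]
  by_cases hxu : PySem.Chars.isupper ch = true
  · rw [if_pos hxu]
    have ha : PySem.Chars.isalpha ch = true := by simp [PySem.Chars.isalpha, hxu]
    rw [if_pos ha]
    simp only [hxu, Bool.not_true, if_neg (by simp : ¬((false : Bool) = true)),
      upperChar_of_isupper hxu]
    rcases hg : (PySem.Dict.ofList mapping).get? (String.ofList [ch]) with _ | v
    · have hcont : (PySem.Dict.ofList mapping).contains (String.ofList [ch]) = false := by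
        rw [PySem.Dict.contains_eq_isSome_get?, hg]; rfl
      simp [hcont]
    · have hcont : (PySem.Dict.ofList mapping).contains (String.ofList [ch]) = true := by
        rw [PySem.Dict.contains_eq_isSome_get?, hg]; rfl
      simp [hcont, PySem.Dict.getD_eq_get?_getD, hg]
  · by_cases hxl : PySem.Chars.islower ch = true
    · rw [if_neg hxu, if_pos hxl]
      have ha : PySem.Chars.isalpha ch = true := by simp [PySem.Chars.isalpha, hxl]
      rw [if_pos ha]
      simp only [Bool.eq_false_iff.mpr hxu, Bool.not_false, if_pos rfl]
      rcases hg : (PySem.Dict.ofList mapping).get? (String.ofList [PySem.Chars.upperChar ch]) with _ | v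
      · have hcont : (PySem.Dict.ofList mapping).contains (String.ofList [PySem.Chars.upperChar ch]) = false := by
          rw [PySem.Dict.contains_eq_isSome_get?, hg]; rfl
        simp [hcont, PySem.Str.toList_lower, PySem.Chars.lower, lowerChar_upperChar hxl]
      · have hcont : (PySem.Dict.ofList mapping).contains (String.ofList [PySem.Chars.upperChar ch]) = true := by
          rw [PySem.Dict.contains_eq_isSome_get?, hg]; rfl
        simp [hcont, PySem.Dict.getD_eq_get?_getD, hg]
    · have ha : PySem.Chars.isalpha ch = false := by
        simp [PySem.Chars.isalpha, Bool.eq_false_iff.mpr hxu, Bool.eq_false_iff.mpr hxl]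
      rw [if_neg (by simp [ha]), if_neg hxu, if_neg hxl]
      simp

lemma main_fold (mapping : List (String × String)) (cs : List Char) (acc : List Char) :
    cs.foldl (fun result ch =>
      if PySem.Chars.isalpha ch then
        let is_upper := PySem.Chars.isupper ch
        let c := PySem.Chars.upperChar ch
        let md := PySem.Dict.ofList mapping
        let p := if md.contains (String.ofList [c]) then md.getD (String.ofList [c]) "" else String.ofList [c]
        let p := if !is_upper then PySem.Str.lower p else p
        result ++ p.toList
      else
        result ++ [ch]) acc =
    acc ++ cs.flatMap (fun ch =>
      (((pvTable mapping).get? ch).getD (String.ofList [ch])).toList) := by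
  induction cs generalizing acc with
  | nil => simp
  | cons ch cs ih =>
    rw [List.foldl_cons, ih, List.flatMap_cons]
    show (if PySem.Chars.isalpha ch then _ else acc ++ [ch]) ++ _ = _
    rw [body_eq, List.append_assoc]

-- ===== VERDICT (by name: the statement is the Claim_ definition above) =====
theorem decrypt_with_mapping_spec : Claim_equal_decrypt_with_mapping := by
  intro ciphertext mapping _
  unfold Spec_decrypt_with_mapping decrypt_with_mapping decrypt_with_mapping_alt
  rw [main_fold, List.nil_append]
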